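-- pv_equiv track=rewrite | github.com/aa989190f363e46d/homework | coins/coins.py | max_sum_of_2
-- ===== SOURCE A (Python) =====
-- def max_sum_of_2(*args) -> int:
--     if len(args) != 3:
--         raise ValueError(f"Count of arguments must be 3 but get {len(args)}")
--     for coin_val in args:
--         try:
--             check_coin_val(coin_val)
--         except ValueError as e:
--             raise e
--     return _calculate_sum(*args)
--
-- def check_coin_val(coin_val: int) -> None:
--     if not type(coin_val) == int:
--         raise ValueError(f"Illegal coin value type ({coin_val})")
--     if coin_val <= 0:
--         raise ValueError(f"Illegal coin nominal ({coin_val})")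
--
-- def _calculate_sum(*args):
--     return sum(sorted(args)[-2:])
-- ===== SOURCE B (Python) =====
-- def max_sum_of_2(*args) -> int:
--     if len(args) != 3:
--         raise ValueError(f"Count of arguments must be 3 but get {len(args)}")
--     for coin_val in args:
--         if not type(coin_val) == int:
--             raise ValueError(f"Illegal coin value type ({coin_val})")
--         if coin_val <= 0:
--             raise ValueError(f"Illegal coin nominal ({coin_val})")
--     return sum(args) - min(args)
-- ===== Notes on version B (the rewrite author's own statement) =====
-- stated objective: simpler
-- what changed: Replaces the sort-and-slice core (sum(sorted(args)[-2:])) with the closed form sum(args) - min(args), and inlines the validation helper; the length-3 and positivity checks with identical messages are kept.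
import Mathlib
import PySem

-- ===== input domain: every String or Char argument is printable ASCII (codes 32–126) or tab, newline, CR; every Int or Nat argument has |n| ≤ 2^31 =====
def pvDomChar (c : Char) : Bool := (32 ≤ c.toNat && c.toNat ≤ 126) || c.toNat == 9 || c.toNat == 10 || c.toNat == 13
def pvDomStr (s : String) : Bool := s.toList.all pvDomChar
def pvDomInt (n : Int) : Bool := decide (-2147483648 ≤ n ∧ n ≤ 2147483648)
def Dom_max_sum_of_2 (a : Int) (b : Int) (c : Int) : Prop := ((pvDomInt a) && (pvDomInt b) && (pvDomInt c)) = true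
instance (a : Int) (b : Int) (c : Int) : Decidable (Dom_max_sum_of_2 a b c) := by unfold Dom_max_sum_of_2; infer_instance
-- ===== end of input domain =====

-- B replaces the sort-and-slice core with the closed form sum - min (simpler); validation is unchanged.

-- ===== PORT A =====
-- _calculate_sum(*args) = sum(sorted(args)[-2:])
def pvCalculateSum (args : List Int) : Int :=
  (PySem.List.slice (PySem.List.sorted args (fun x => x) false) (some (-2)) none).sum

def max_sum_of_2 (a : Int) (b : Int) (c : Int) : Int :=
  pvCalculateSum [a, b, c]

-- ===== PORT B =====
def max_sum_of_2_alt (a : Int) (b : Int) (c : Int) : Int :=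
  (a + b + c) - min a (min b c)

-- ===== PRECONDITION & SPEC =====
-- Pre_ excludes exactly the inputs where A raises ValueError ("Illegal coin nominal"): any coin ≤ 0.
def Pre_max_sum_of_2 (a : Int) (b : Int) (c : Int) : Prop := 0 < a ∧ 0 < b ∧ 0 < c
instance (a : Int) (b : Int) (c : Int) : Decidable (Pre_max_sum_of_2 a b c) := by unfold Pre_max_sum_of_2; infer_instance
def pvWitness_max_sum_of_2 : Int × Int × Int := (2, 5, 3)

def Spec_max_sum_of_2 (a : Int) (b : Int) (c : Int) (out : Int) : Prop := out = max_sum_of_2_alt a b c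
instance (a : Int) (b : Int) (c : Int) (out : Int) : Decidable (Spec_max_sum_of_2 a b c out) := by unfold Spec_max_sum_of_2; infer_instance

-- ===== CLAIM (what is proved, stated in full; the proofs are below) =====
def Claim_equal_max_sum_of_2 : Prop := ∀ (a : Int) (b : Int) (c : Int), Dom_max_sum_of_2 a b c → Pre_max_sum_of_2 a b c → Spec_max_sum_of_2 a b c (max_sum_of_2 a b c)

-- ===== LEMMAS AND PROOFS =====
theorem sorted_three (a b c : Int) :
    ∃ x y z : Int, PySem.List.sorted [a, b, c] (fun x => x) false = [x, y, z] ∧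
      x ≤ y ∧ y ≤ z ∧ (x + y + z = a + b + c) ∧ x = min a (min b c) := by
  have hperm := PySem.List.sorted_perm (xs := [a, b, c]) (key := fun x => x) (rev := false)
  have hpw := PySem.List.sorted_pairwise (xs := [a, b, c]) (key := fun x => x)
  have hlen : (PySem.List.sorted [a, b, c] (fun x => x) false).length = 3 := by
    simp [hperm.length_eq]
  obtain ⟨x, y, z, hs⟩ : ∃ x y z, PySem.List.sorted [a, b, c] (fun x => x) false = [x, y, z] := by
    match h : PySem.List.sorted [a, b, c] (fun x => x) false with
    | [x, y, z] => exact ⟨x, y, z, rfl⟩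
    | [] | [_] | [_, _] | _ :: _ :: _ :: _ :: _ => simp [h] at hlen
  rw [hs] at hperm hpw
  have hxy : x ≤ y := by simpa using hpw.rel_head (by simp)
  have hyz : y ≤ z := by
    have := hpw.tail
    simpa using this.rel_head (by simp)
  have hsum : x + y + z = a + b + c := by
    have h := hperm.sum_eq
    simp at h
    omega
  have hmem : x ∈ ([a, b, c] : List Int) := hperm.mem_iff.mp (by simp)
  have hle : ∀ w ∈ ([a, b, c] : List Int), x ≤ w := by
    intro w hw
    have hw' : w ∈ ([x, y, z] : List Int) := hperm.mem_iff.mpr hw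
    simp at hw'
    omega
  have hmin : x = min a (min b c) := by
    have ha := hle a (by simp); have hb := hle b (by simp); have hc := hle c (by simp)
    simp at hmem
    rcases hmem with h | h | h <;> omega
  exact ⟨x, y, z, hs, hxy, hyz, hsum, hmin⟩

-- ===== VERDICT (by name: the statement is the Claim_ definition above) =====
theorem max_sum_of_2_spec : Claim_equal_max_sum_of_2 := by
  intro a b c _ _
  unfold Spec_max_sum_of_2 max_sum_of_2 max_sum_of_2_alt pvCalculateSum
  obtain ⟨x, y, z, hs, _, _, hsum, hmin⟩ := sorted_three a b c
  rw [hs, PySem.List.slice_from_neg_ofNat _ 2 (by omega)]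
  simp
  omega
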